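-- pv_equiv track=rewrite | github.com/Joyuv/Resgate-Real-Remake | rank.py | get_rankdecrescente
-- ===== SOURCE A (Python) =====
-- def get_rankdecrescente(rankdict:dict[str,int]):
--     '''Essa função ordena o ranking em ordem decrescente, da maior quantidade de pontos até a menor.
--
--     - Parâmetros:
--         - rankdict: É o arquivo ranking.json carregado e convertido em um dicionário python
--     '''
--     listavalues = sorted(rankdict.values(),reverse=True)
--     dictdec = {}
--     for pontos in listavalues:
--         for name in rankdict:
--             if rankdict[name] == pontos:
--                 dictdec.update({name:pontos})
--
--
--     drank = {"jogadores":[], "pontos":[]}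
--     for player in dictdec:
--         alphaplayer = ''
--         for a in range(0,len(player)):
--             if a == len(player)-1:
--                 break
--             alphaplayer += player[a]
--         drank['jogadores'].append(alphaplayer)
--         drank['pontos'].append(str(dictdec[player]))
--     return drank
-- ===== SOURCE B (Python) =====
-- def get_rankdecrescente(rankdict: dict[str, int]):
--     '''Ordena o ranking em ordem decrescente (reimplementação: bucket por pontos).'''
--     buckets = {}
--     for name, pts in rankdict.items():
--         buckets.setdefault(pts, []).append(name)
--     jogadores = []
--     pontos = []
--     for pts in sorted(buckets, reverse=True):
--         for name in buckets[pts]: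
--             jogadores.append(name[:-1])
--             pontos.append(str(pts))
--     return {"jogadores": jogadores, "pontos": pontos}
-- ===== Notes on version B (the rewrite author's own statement) =====
-- stated objective: faster
-- what changed: B builds a points->names grouping dict in one pass and walks the distinct point values in descending order, replacing A's sort of all values followed by a full rescan of the dict for every value (and its per-character name-truncation loop is replaced by a slice); Pre_ excludes association lists with a duplicated key, which cannot arise from a Python dict and whose collapse order is accidental.
import Mathlib
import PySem

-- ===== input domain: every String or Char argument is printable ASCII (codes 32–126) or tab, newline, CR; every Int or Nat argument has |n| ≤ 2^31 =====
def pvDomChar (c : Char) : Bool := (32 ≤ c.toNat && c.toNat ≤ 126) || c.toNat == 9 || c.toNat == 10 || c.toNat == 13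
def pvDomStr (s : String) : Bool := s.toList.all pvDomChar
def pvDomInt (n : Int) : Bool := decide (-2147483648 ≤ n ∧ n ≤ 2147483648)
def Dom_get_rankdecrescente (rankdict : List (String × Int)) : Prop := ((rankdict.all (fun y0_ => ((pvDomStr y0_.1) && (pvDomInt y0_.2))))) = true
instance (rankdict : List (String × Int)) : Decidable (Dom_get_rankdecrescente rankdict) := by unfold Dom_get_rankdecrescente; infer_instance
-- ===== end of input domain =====

-- B groups the names into a dict keyed by points (one pass) and walks the distinct
-- point values in descending order, instead of A's sort-values-then-rescan-the-dict
-- nested loops: a different traversal of the data (objective: faster on large inputs).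

-- ===== PORT A =====
-- inner loop of A: «alphaplayer = ''; for a in range(0,len(player)): if a == len(player)-1: break; alphaplayer += player[a]»
def pvAlphaGo (player : List Char) (idxs : List Int) (acc : List Char) : List Char :=
  match idxs with
  | [] => acc
  | a :: rest =>
    if a = (player.length : Int) - 1 then acc   -- the `break`
    else
      match PySem.List.pyGet? player a with
      | some c => pvAlphaGo player rest (acc ++ [c])
      | none => acc     -- unreachable: a ∈ range(0, len(player))

def get_rankdecrescente (rankdict : List (String × Int)) : List (String × List String) :=
  let listavalues := PySem.List.sorted (rankdict.map Prod.snd) (fun v => v) true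
  let dictdec : PySem.Dict String Int :=
    listavalues.foldl (fun d pontos =>
      rankdict.foldl (fun d' p =>
        match (PySem.Dict.mk rankdict).get? p.1 with     -- rankdict[name]
        | some w => if w = pontos then d'.insert p.1 pontos else d'
        | none => d'     -- unreachable: p.1 is a key of rankdict
      ) d) PySem.Dict.empty
  let res := dictdec.items.foldl (fun (acc : List String × List String) pl =>
      let alphaplayer :=
        String.ofList (pvAlphaGo pl.1.toList (PySem.List.pyRange 0 (pl.1.toList.length : Int)) [])
      match dictdec.get? pl.1 with     -- dictdec[player]
      | some v => (acc.1 ++ [alphaplayer], acc.2 ++ [PySem.Int.toStr v])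
      | none => acc     -- unreachable: pl.1 is a key of dictdec
    ) ([], [])
  [("jogadores", res.1), ("pontos", res.2)]

-- ===== PORT B =====
def get_rankdecrescente_alt (rankdict : List (String × Int)) : List (String × List String) :=
  let buckets : PySem.Dict Int (List String) :=
    rankdict.foldl (fun d p => d.modify p.2 [] (fun l => l ++ [p.1])) PySem.Dict.empty
  let res := (PySem.List.sorted buckets.keys (fun v => v) true).foldl
    (fun (acc : List String × List String) pts =>
      (buckets.getD pts []).foldl (fun (acc : List String × List String) name =>
        (acc.1 ++ [PySem.Str.slice name none (some (-1))], acc.2 ++ [PySem.Int.toStr pts])) acc)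
    ([], [])
  [("jogadores", res.1), ("pontos", res.2)]

-- ===== PRECONDITION & SPEC =====
-- Pre_ excludes association lists with a duplicated key: the parameter is a Python
-- dict, whose keys are necessarily distinct, so no dict input is excluded.
def Pre_get_rankdecrescente (rankdict : List (String × Int)) : Prop :=
  (rankdict.map Prod.fst).Nodup
instance (rankdict : List (String × Int)) : Decidable (Pre_get_rankdecrescente rankdict) := by
  unfold Pre_get_rankdecrescente; infer_instance

def pvWitness_get_rankdecrescente : (List (String × Int)) := [("ana", 2), ("bob", 5), ("cy", 2)]

def Spec_get_rankdecrescente (rankdict : List (String × Int)) (out : List (String × List String)) : Prop := out = get_rankdecrescente_alt rankdict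
instance (rankdict : List (String × Int)) (out : List (String × List String)) : Decidable (Spec_get_rankdecrescente rankdict out) := by unfold Spec_get_rankdecrescente; infer_instance

-- ===== CLAIM (what is proved, stated in full; the proofs are below) =====
def Claim_equal_get_rankdecrescente : Prop := ∀ (rankdict : List (String × Int)), Dom_get_rankdecrescente rankdict → Pre_get_rankdecrescente rankdict → Spec_get_rankdecrescente rankdict (get_rankdecrescente rankdict)

-- ===== LEMMAS AND PROOFS =====

-- the (name, value) pairs of rankdict whose value is v, in rankdict order
def pvGroup (rankdict : List (String × Int)) (v : Int) : List (String × Int) :=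
  (rankdict.filter (fun p => p.2 == v)).map (fun p => (p.1, v))

-- A's alphaplayer loop computes player[:-1]
theorem pvAlphaGo_spec (cs : List Char) (k : Nat) (hk : k ≤ cs.length) (acc : List Char) :
    pvAlphaGo cs (PySem.List.pyRange (k : Int) (cs.length : Int)) acc
      = acc ++ (cs.drop k).dropLast := by
  induction hn : cs.length - k generalizing k acc with
  | zero =>
    have hke : k = cs.length := by omega
    subst hke
    rw [PySem.List.pyRange_one_eq_nil (by omega)]
    simp [pvAlphaGo]
  | succ n ih =>
    have hlt : k < cs.length := by omega
    rw [PySem.List.pyRange_one_cons (by exact_mod_cast hlt)]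
    unfold pvAlphaGo
    by_cases hlast : (k : Int) = (cs.length : Int) - 1
    · have hke : k = cs.length - 1 := by omega
      rw [if_pos hlast]
      have : cs.drop k = [cs[k]] := by
        rw [List.drop_eq_getElem_cons hlt]
        have : cs.drop (k+1) = [] := by
          apply List.drop_eq_nil_of_le; omega
        rw [this]
      simp [this]
    · rw [if_neg hlast]
      have hget : PySem.List.pyGet? cs (k : Int) = some cs[k] := by
        rw [PySem.List.pyGet?_natCast]
        exact List.getElem?_eq_getElem hlt
      rw [hget]; dsimp only
      have hcast : ((k : Int) + 1) = ((k + 1 : Nat) : Int) := by push_cast; ring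
      rw [hcast, ih (k+1) (by omega) _ (by omega)]
      have hdrop : cs.drop k = cs[k] :: cs.drop (k+1) := List.drop_eq_getElem_cons hlt
      have hne : cs.drop (k+1) ≠ [] := by
        intro h
        have := List.drop_eq_nil_iff.mp h
        omega
      rw [hdrop, List.dropLast_cons_of_ne_nil hne]
      simp

-- B's name[:-1] is what A's character loop builds
theorem pvSlice_eq (s : String) :
    PySem.Str.slice s none (some (-1))
      = String.ofList (pvAlphaGo s.toList (PySem.List.pyRange 0 (s.toList.length : Int)) []) := by
  have h := pvAlphaGo_spec s.toList 0 (by omega) []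
  apply String.toList_inj.mp
  rw [PySem.Str.slice_to_neg_one]
  simp only [Nat.cast_zero] at h
  rw [h]
  simp

-- inserting a key that is already bound to the same value changes nothing (unique keys)
theorem pvInsert_same {κ ν : Type} [BEq κ] [LawfulBEq κ] (d : PySem.Dict κ ν) (k : κ) (v : ν)
    (hnd : d.keys.Nodup) (hv : d.get? k = some v) : d.insert k v = d := by
  have hfind : ∃ p ∈ d.items, d.items.find? (fun p => p.1 == k) = some p ∧ p.1 = k ∧ p.2 = v := by
    unfold PySem.Dict.get? at hv
    cases hf : d.items.find? (fun p => p.1 == k) with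
    | none => simp [hf] at hv
    | some p =>
      refine ⟨p, List.mem_of_find?_eq_some hf, rfl, ?_, ?_⟩
      · have := List.find?_some hf; simpa using this
      · simp [hf] at hv; exact hv
  obtain ⟨p, hpmem, hf, hpk, hpv⟩ := hfind
  have hcont : d.contains k = true := by
    unfold PySem.Dict.contains
    exact List.any_eq_true.mpr ⟨p, hpmem, by simp [hpk]⟩
  apply PySem.Dict.ext
  unfold PySem.Dict.insert
  simp only [hcont, if_pos]
  show d.items.map (fun q => if (q.1 == k) = true then (k, v) else q) = d.items
  have : ∀ q ∈ d.items, (fun q => if (q.1 == k) = true then (k, v) else q) q = q := by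
    intro q hq
    by_cases hqk : (q.1 == k) = true
    · have hq1 : q.1 = k := by simpa using hqk
      have : q = p := List.inj_on_of_nodup_map hnd hq hpmem (by rw [hq1, hpk])
      simp [this, hpk.symm, hpv.symm]
    · simp [hqk]
  simpa using List.map_congr_left this

-- lookup in the input dict (unique keys) returns the stored value
theorem pvMkGet (rankdict : List (String × Int)) (hkn : (rankdict.map Prod.fst).Nodup)
    (p : String × Int) (hp : p ∈ rankdict) :
    (PySem.Dict.mk rankdict).get? p.1 = some p.2 :=
  PySem.Dict.get?_of_mem_items _ hp hkn

-- the inner loop of A is a fold of plain inserts over the matching pairs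
theorem pvInner_eq (rankdict : List (String × Int)) (hkn : (rankdict.map Prod.fst).Nodup)
    (d : PySem.Dict String Int) (v : Int) :
    (rankdict.foldl (fun d' p =>
        match (PySem.Dict.mk rankdict).get? p.1 with
        | some w => if w = v then d'.insert p.1 v else d'
        | none => d') d)
      = (rankdict.filter (fun p => p.2 == v)).foldl (fun d' p => d'.insert p.1 v) d := by
  rw [List.foldl_filter]
  apply PySem.List.foldl_congr_mem
  intro acc p hp
  rw [pvMkGet rankdict hkn p hp]
  by_cases h : p.2 = v <;> simp [h]

-- one pass of A's outer loop, fresh value: appends the whole group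
theorem pvStep_fresh (rankdict : List (String × Int)) (hkn : (rankdict.map Prod.fst).Nodup)
    (d : PySem.Dict String Int) (v : Int)
    (hfresh : ∀ p ∈ rankdict.filter (fun p => p.2 == v), d.contains p.1 = false) :
    (rankdict.foldl (fun d' p =>
        match (PySem.Dict.mk rankdict).get? p.1 with
        | some w => if w = v then d'.insert p.1 v else d'
        | none => d') d).items = d.items ++ pvGroup rankdict v := by
  rw [pvInner_eq rankdict hkn d v]
  have hnd : ((rankdict.filter (fun p => p.2 == v)).map Prod.fst).Nodup :=
    hkn.sublist (List.Sublist.map Prod.fst (List.filter_sublist))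
  exact PySem.Dict.items_foldl_insert_fresh _ Prod.fst (fun _ => v) d hfresh hnd

-- one pass of A's outer loop, already-processed value: no change
theorem pvStep_repeat (rankdict : List (String × Int)) (hkn : (rankdict.map Prod.fst).Nodup)
    (d : PySem.Dict String Int) (v : Int) (hnd : d.keys.Nodup)
    (hold : ∀ p ∈ rankdict.filter (fun p => p.2 == v), d.get? p.1 = some v) :
    (rankdict.foldl (fun d' p =>
        match (PySem.Dict.mk rankdict).get? p.1 with
        | some w => if w = v then d'.insert p.1 v else d'
        | none => d') d) = d := by
  rw [pvInner_eq rankdict hkn d v]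
  generalize rankdict.filter (fun p => p.2 == v) = l at hold
  induction l with
  | nil => rfl
  | cons p rest ih =>
    simp only [List.foldl_cons]
    rw [pvInsert_same d p.1 v hnd (hold p (by simp))]
    exact ih (fun q hq => hold q (by simp [hq]))

-- membership in a concatenation of groups
theorem pvMem_flatMap_group (rankdict : List (String × Int)) (D : List Int) (q : String × Int) :
    q ∈ D.flatMap (pvGroup rankdict) ↔
      ∃ r ∈ rankdict, r.2 = q.2 ∧ r.1 = q.1 ∧ q.2 ∈ D := by
  simp only [List.mem_flatMap, pvGroup, List.mem_map, List.mem_filter]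
  constructor
  · rintro ⟨v, hv, r, ⟨hr, hrv⟩, hq⟩
    have hv2 : r.2 = v := by simpa using hrv
    cases hq
    exact ⟨r, hr, hv2, rfl, hv⟩
  · rintro ⟨r, hr, hr2, hr1, hq2⟩
    exact ⟨q.2, hq2, r, ⟨hr, by simp [hr2]⟩, by rw [hr1]⟩

-- the dict A builds: its items are the groups of the distinct values in processing order
theorem pvDictdec_items (rankdict : List (String × Int)) (hkn : (rankdict.map Prod.fst).Nodup)
    (L : List Int) (hs : L.Pairwise (fun a b => b ≤ a)) :
    (L.foldl (fun d pontos =>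
        rankdict.foldl (fun d' p =>
          match (PySem.Dict.mk rankdict).get? p.1 with
          | some w => if w = pontos then d'.insert p.1 pontos else d'
          | none => d') d) PySem.Dict.empty).items
      = (PySem.Set.ofList L : List Int).flatMap (pvGroup rankdict) ∧
    (L.foldl (fun d pontos =>
        rankdict.foldl (fun d' p =>
          match (PySem.Dict.mk rankdict).get? p.1 with
          | some w => if w = pontos then d'.insert p.1 pontos else d'
          | none => d') d) PySem.Dict.empty).keys.Nodup := by
  induction L using List.reverseRecOn with
  | nil => simp [PySem.Set.ofList, PySem.Set.empty, PySem.Dict.empty, PySem.Dict.keys]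
  | append_singleton L v ih =>
    have hsL : L.Pairwise (fun a b => b ≤ a) := (List.pairwise_append.mp hs).1
    obtain ⟨hitems, hknodup⟩ := ih hsL
    rw [List.foldl_append, List.foldl_cons, List.foldl_nil]
    set D := L.foldl (fun d pontos =>
        rankdict.foldl (fun d' p =>
          match (PySem.Dict.mk rankdict).get? p.1 with
          | some w => if w = pontos then d'.insert p.1 pontos else d'
          | none => d') d) PySem.Dict.empty with hD
    by_cases hv : v ∈ L
    · -- already processed: no change
      have hvS : v ∈ (PySem.Set.ofList L : List Int) := (PySem.Set.mem_ofList L v).mpr hv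
      have hold : ∀ p ∈ rankdict.filter (fun p => p.2 == v), D.get? p.1 = some v := by
        intro p hp
        have hpm : (p.1, v) ∈ D.items := by
          rw [hitems, pvMem_flatMap_group]
          obtain ⟨hpr, hpv⟩ := List.mem_filter.mp hp
          exact ⟨p, hpr, by simpa using hpv, rfl, hvS⟩
        exact PySem.Dict.get?_of_mem_items D hpm hknodup
      rw [pvStep_repeat rankdict hkn D v hknodup hold]
      have hset : PySem.Set.ofList (L ++ [v]) = PySem.Set.ofList L := by
        rw [PySem.Set.ofList_append_singleton]
        unfold PySem.Set.add
        rw [if_pos]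
        simpa [PySem.Set.contains_iff] using hvS
      rw [hset]
      exact ⟨hitems, hknodup⟩
    · -- fresh value: the whole group is appended
      have hvS : v ∉ (PySem.Set.ofList L : List Int) := fun h => hv ((PySem.Set.mem_ofList L v).mp h)
      have hfresh : ∀ p ∈ rankdict.filter (fun p => p.2 == v), D.contains p.1 = false := by
        intro p hp
        obtain ⟨hpr, hpv⟩ := List.mem_filter.mp hp
        have hpv' : p.2 = v := by simpa using hpv
        by_contra hc
        have hc' : D.contains p.1 = true := by
          cases h : D.contains p.1
          · exact absurd h hc
          · rfl
        obtain ⟨q, hq, hqk⟩ := List.any_eq_true.mp hc'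
        have hq1 : q.1 = p.1 := by simpa using hqk
        rw [hitems, pvMem_flatMap_group] at hq
        obtain ⟨r, hr, hr2, hr1, hq2⟩ := hq
        have hrp : r = p := List.inj_on_of_nodup_map hkn hr hpr (by rw [hr1, hq1])
        rw [hrp, hpv'] at hr2
        rw [← hr2] at hq2
        exact hvS hq2
      have hstep := pvStep_fresh rankdict hkn D v hfresh
      have hset : (PySem.Set.ofList (L ++ [v]) : List Int) = PySem.Set.ofList L ++ [v] := by
        rw [PySem.Set.ofList_append_singleton]
        unfold PySem.Set.add
        rw [if_neg (by simpa [PySem.Set.contains_iff] using hvS)]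
      constructor
      · rw [hstep, hitems, hset, List.flatMap_append]
        simp
      · have hkeys : (rankdict.foldl (fun d' p =>
            match (PySem.Dict.mk rankdict).get? p.1 with
            | some w => if w = v then d'.insert p.1 v else d'
            | none => d') D).keys
            = D.keys ++ (pvGroup rankdict v).map Prod.fst := by
          show ((rankdict.foldl _ D).items.map Prod.fst) = _
          rw [hstep, List.map_append]
          rfl
        rw [hkeys, List.nodup_append]
        refine ⟨hknodup, ?_, ?_⟩
        · simp only [pvGroup, List.map_map]
          have : ((rankdict.filter (fun p => p.2 == v)).map
              (Prod.fst ∘ (fun p => (p.1, v)))) = (rankdict.filter (fun p => p.2 == v)).map Prod.fst := by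
            rfl
          rw [this]
          exact hkn.sublist (List.Sublist.map Prod.fst (List.filter_sublist))
        · intro a ha b hb
          simp only [pvGroup, List.map_map, List.mem_map, Function.comp_def] at hb
          obtain ⟨p, hp, hpa⟩ := hb
          intro hab
          subst hab
          have hcf := hfresh p hp
          have : D.contains p.1 = true := by
            unfold PySem.Dict.contains
            unfold PySem.Dict.keys at ha
            obtain ⟨q, hq, hqa⟩ := List.mem_map.mp ha
            exact List.any_eq_true.mpr ⟨q, hq, by simp [hqa, ← hpa]⟩
          rw [this] at hcf
          exact absurd hcf (by simp)

-- PySem.Set.ofList keeps a sublist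
theorem pvOfList_sublist {α : Type} [BEq α] [LawfulBEq α] (xs : List α) :
    (PySem.Set.ofList xs : List α).Sublist xs := by
  induction xs using List.reverseRecOn with
  | nil => simp [PySem.Set.ofList, PySem.Set.empty]
  | append_singleton xs x ih =>
    rw [PySem.Set.ofList_append_singleton]
    unfold PySem.Set.add
    split
    · exact ih.trans (List.sublist_append_left _ _)
    · exact List.Sublist.append ih (List.Sublist.refl _)

-- the distinct values of the descending value list, in order, are sorted(set(values), reverse=True)
theorem pvDistinct_desc (vals : List Int) :
    (PySem.Set.ofList (PySem.List.sorted vals (fun v => v) true) : List Int)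
      = PySem.List.sorted (PySem.Set.ofList vals : List Int) (fun v => v) true := by
  symm
  apply PySem.List.sorted_rev_eq_of_perm_of_pairwise_gt
  · rw [List.perm_ext_iff_of_nodup (PySem.Set.nodup_ofList _) (PySem.Set.nodup_ofList _)]
    intro a
    simp [PySem.Set.mem_ofList, PySem.List.mem_sorted]
  · have h1 : (PySem.Set.ofList (PySem.List.sorted vals (fun v => v) true) : List Int).Pairwise
        (fun a b => b ≤ a) :=
      (PySem.List.sorted_pairwise_rev vals (fun v => v)).sublist (pvOfList_sublist _)
    have h2 := PySem.Set.nodup_ofList (PySem.List.sorted vals (fun v => v) true)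
    exact (h1.and h2).imp (fun h => lt_of_le_of_ne h.1 (Ne.symm h.2))

-- B's buckets: the bucket of v holds the names whose value is v, in order
theorem pvBuckets_getD (rankdict : List (String × Int)) (v : Int) :
    (rankdict.foldl (fun d p => d.modify p.2 [] (fun l => l ++ [p.1]))
        (PySem.Dict.empty : PySem.Dict Int (List String))).getD v []
      = (rankdict.filter (fun p => p.2 == v)).map Prod.fst := by
  have h : rankdict.foldl (fun d p => d.modify p.2 [] (fun l => l ++ [p.1]))
        (PySem.Dict.empty : PySem.Dict Int (List String))
      = (rankdict.map Prod.swap).foldl (fun d q => d.modify q.1 [] (fun l => l ++ [q.2]))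
        PySem.Dict.empty := by
    rw [List.foldl_map]
    rfl
  rw [h, PySem.Dict.getD_foldl_modify_append]
  simp [List.filter_map, Function.comp_def, Prod.swap]

-- B's buckets: the keys are the distinct values in first-appearance order
theorem pvBuckets_keys (rankdict : List (String × Int)) :
    (rankdict.foldl (fun d p => d.modify p.2 [] (fun l => l ++ [p.1]))
        (PySem.Dict.empty : PySem.Dict Int (List String))).keys
      = PySem.Set.ofList (rankdict.map Prod.snd) := by
  rw [PySem.Dict.keys_foldl_modify_key rankdict Prod.snd [] (fun d p l => l ++ [p.1])]
  rw [PySem.Dict.keys_empty, PySem.Set.update_nil_left]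

-- ===== VERDICT (by name: the statement is the Claim_ definition above) =====
theorem get_rankdecrescente_spec : Claim_equal_get_rankdecrescente := by
  intro rankdict _ hpre
  unfold Spec_get_rankdecrescente get_rankdecrescente get_rankdecrescente_alt
  dsimp only
  simp only [pvBuckets_keys, pvBuckets_getD]
  have hpre' : (rankdict.map Prod.fst).Nodup := hpre
  obtain ⟨hitems, hknodup⟩ := pvDictdec_items rankdict hpre'
    (PySem.List.sorted (rankdict.map Prod.snd) (fun v => v) true)
    (PySem.List.sorted_pairwise_rev (rankdict.map Prod.snd) (fun v => v))
  rw [pvDistinct_desc] at hitems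
  set S := PySem.List.sorted (PySem.Set.ofList (rankdict.map Prod.snd) : List Int)
      (fun v => v) true with hS
  set I := S.flatMap (pvGroup rankdict) with hI
  set dictdec := (PySem.List.sorted (rankdict.map Prod.snd) (fun v => v) true).foldl
      (fun d pontos =>
        rankdict.foldl (fun d' p =>
          match (PySem.Dict.mk rankdict).get? p.1 with
          | some w => if w = pontos then d'.insert p.1 pontos else d'
          | none => d') d) PySem.Dict.empty with hdd
  -- A's output-building loop, with its dict lookups resolved
  have hA : dictdec.items.foldl (fun (acc : List String × List String) pl =>
        match dictdec.get? pl.1 with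
        | some v => (acc.1 ++ [String.ofList (pvAlphaGo pl.1.toList
            (PySem.List.pyRange 0 (pl.1.toList.length : Int)) [])], acc.2 ++ [PySem.Int.toStr v])
        | none => acc) ([], [])
      = (I.map (fun q => String.ofList (pvAlphaGo q.1.toList
            (PySem.List.pyRange 0 (q.1.toList.length : Int)) [])),
         I.map (fun q => PySem.Int.toStr q.2)) := by
    rw [PySem.List.foldl_congr_mem dictdec.items _
      (fun (acc : List String × List String) pl =>
        (acc.1 ++ [String.ofList (pvAlphaGo pl.1.toList
            (PySem.List.pyRange 0 (pl.1.toList.length : Int)) [])],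
         acc.2 ++ [PySem.Int.toStr pl.2])) ([], [])
      (by
        intro acc pl hpl
        have : dictdec.get? pl.1 = some pl.2 :=
          PySem.Dict.get?_of_mem_items dictdec (by simpa using hpl) hknodup
        rw [this])]
    rw [PySem.List.foldl_prod_mk
      (fun s e => s ++ [String.ofList (pvAlphaGo e.1.toList
        (PySem.List.pyRange 0 (e.1.toList.length : Int)) [])])
      (fun s e => s ++ [PySem.Int.toStr e.2]) dictdec.items [] []]
    rw [PySem.List.foldl_append_singleton_eq_map, PySem.List.foldl_append_singleton_eq_map]
    rw [hitems]
    simp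
  -- B's loop is the same fold over the same pairs
  have hB : (PySem.List.sorted (PySem.Set.ofList (rankdict.map Prod.snd) : List Int)
        (fun v => v) true).foldl
      (fun (acc : List String × List String) pts =>
        ((rankdict.filter (fun p => p.2 == pts)).map Prod.fst).foldl
          (fun (acc : List String × List String) name =>
            (acc.1 ++ [PySem.Str.slice name none (some (-1))],
             acc.2 ++ [PySem.Int.toStr pts])) acc) ([], [])
      = (I.map (fun q => PySem.Str.slice q.1 none (some (-1))),
         I.map (fun q => PySem.Int.toStr q.2)) := by
    have hflat : I.foldl (fun (acc : List String × List String) q =>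
          (acc.1 ++ [PySem.Str.slice q.1 none (some (-1))],
           acc.2 ++ [PySem.Int.toStr q.2])) ([], [])
        = (I.map (fun q => PySem.Str.slice q.1 none (some (-1))),
           I.map (fun q => PySem.Int.toStr q.2)) := by
      rw [PySem.List.foldl_prod_mk
        (fun s e => s ++ [PySem.Str.slice e.1 none (some (-1))])
        (fun s e => s ++ [PySem.Int.toStr e.2]) I [] []]
      rw [PySem.List.foldl_append_singleton_eq_map, PySem.List.foldl_append_singleton_eq_map]
      simp
    rw [hI, List.foldl_flatMap] at hflat
    rw [← hflat]
    apply PySem.List.foldl_congr_mem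
    intro acc v _
    unfold pvGroup
    rw [List.foldl_map, List.foldl_map]
  rw [hA, hB]
  simp only [pvSlice_eq]
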